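-- pv_equiv track=rewrite | github.com/chen-ky/ks-bin-fuzzer | src/backend/py3_generator.py | _sanitise_fn_name
-- ===== SOURCE A (Python) =====
-- import string
--
-- def _sanitise_fn_name(fn_name: str) -> str:
--     """
--     Clean provided string to be used as function name. Will remove
--     whitespace, punctuations (excluding `_`) and convert the name to
--     lowercase.
--
--     :param fn_name: String to sanitise
--     :returns: Cleaned string with `_` appended (to prevent Python name
--     collision)
--     """
--     result = fn_name.lower()
--     to_remove_chars = string.punctuation.replace(
--         "_", "") + string.whitespace
--     for c in to_remove_chars:
--         result = result.replace(c, "")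
--     result += "_"
--     return result
-- ===== SOURCE B (Python) =====
-- import string
--
-- _DROP = set(string.punctuation.replace("_", "") + string.whitespace)
--
-- def _sanitise_fn_name(fn_name: str) -> str:
--     """
--     Clean provided string to be used as function name. Will remove
--     whitespace, punctuations (excluding `_`) and convert the name to
--     lowercase.
--     """
--     return "".join(c for c in fn_name.lower() if c not in _DROP) + "_"
-- ===== Notes on version B (the rewrite author's own statement) =====
-- stated objective: idiomatic
-- what changed: A rescans the whole string once per removal character (38 str.replace passes); B precomputes one set of characters to drop and filters the lowercased input in a single pass with set membership.
import Mathlib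
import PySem

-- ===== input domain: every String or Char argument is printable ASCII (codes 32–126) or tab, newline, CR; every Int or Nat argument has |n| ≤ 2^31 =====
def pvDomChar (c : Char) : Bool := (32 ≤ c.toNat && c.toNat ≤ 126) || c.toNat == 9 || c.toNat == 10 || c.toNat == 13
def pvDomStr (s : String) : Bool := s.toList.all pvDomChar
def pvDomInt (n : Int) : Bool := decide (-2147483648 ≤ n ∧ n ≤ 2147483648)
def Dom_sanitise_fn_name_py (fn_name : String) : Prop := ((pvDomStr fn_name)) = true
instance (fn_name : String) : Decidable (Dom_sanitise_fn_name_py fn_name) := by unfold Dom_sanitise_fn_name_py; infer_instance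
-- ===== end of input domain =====

-- B replaces A's 38 per-character str.replace passes over the whole string by one pass over the
-- lowercased input filtering with a precomputed set of characters to drop (idiomatic; same result).

-- ===== PORT A =====
-- string.punctuation and string.whitespace (CPython constants, literal)
def pyPunctuation : String := "!\"#$%&'()*+,-./:;<=>?@[\\]^_`{|}~"
def pyWhitespace : String := " \t\n\r\x0b\x0c"

def sanitise_fn_name_py (fn_name : String) : String :=
  let result := PySem.Str.lower fn_name
  let to_remove_chars := PySem.Str.replace pyPunctuation "_" "" ++ pyWhitespace
  let result := to_remove_chars.toList.foldl
    (fun r c => PySem.Str.replace r (String.ofList [c]) "") result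
  result ++ "_"

-- ===== PORT B =====
-- drop = set(string.punctuation.replace("_", "") + string.whitespace), built once
def pyDropSet : PySem.Set Char :=
  PySem.Set.ofList (PySem.Str.replace pyPunctuation "_" "" ++ pyWhitespace).toList

def sanitise_fn_name_py_alt (fn_name : String) : String :=
  String.ofList ((PySem.Str.lower fn_name).toList.filter
    (fun c => !(pyDropSet.contains c))) ++ "_"

-- ===== PRECONDITION & SPEC =====
def Spec_sanitise_fn_name_py (fn_name : String) (out : String) : Prop := out = sanitise_fn_name_py_alt fn_name
instance (fn_name : String) (out : String) : Decidable (Spec_sanitise_fn_name_py fn_name out) := by unfold Spec_sanitise_fn_name_py; infer_instance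

-- ===== CLAIM (what is proved, stated in full; the proofs are below) =====
def Claim_equal_sanitise_fn_name_py : Prop := ∀ (fn_name : String), Dom_sanitise_fn_name_py fn_name → Spec_sanitise_fn_name_py fn_name (sanitise_fn_name_py fn_name)

-- ===== LEMMAS AND PROOFS =====

-- Chars.replace with a single-char pattern and empty replacement is a filter
theorem replace_go_single (rc : Char) (fuel : Nat) (l acc : List Char)
    (h : l.length ≤ fuel) :
    PySem.Chars.replace.go [rc] [] fuel l acc
      = acc.reverse ++ l.filter (fun c => c != rc) := by
  induction fuel generalizing l acc with
  | zero =>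
    have hl : l = [] := List.eq_nil_of_length_eq_zero (Nat.le_zero.mp h)
    subst hl
    rw [PySem.Chars.replace.go]; simp
  | succ n ih =>
    cases l with
    | nil =>
      rw [PySem.Chars.replace.go]
      simp
      omega
    | cons c t =>
      rw [PySem.Chars.replace.go]
      have ht : t.length ≤ n := by simpa using h
      by_cases hc : c = rc
      · subst hc
        rw [if_pos (by simp [List.isPrefixOf])]
        simp only [List.length_cons, List.length_nil, Nat.zero_add, List.drop_succ_cons,
          List.drop_zero, List.reverse_nil, List.nil_append]
        rw [ih _ _ ht]
        simp
      · rw [if_neg (by simp [List.isPrefixOf, Ne.symm hc])]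
        rw [ih _ _ ht]
        simp [hc]

theorem replace_single_empty (rc : Char) (l : List Char) :
    PySem.Chars.replace l [rc] [] = l.filter (fun c => c != rc) := by
  rw [PySem.Chars.replace]
  simp [replace_go_single rc l.length l [] le_rfl]

-- folding single-char replaces over a removal list filters by non-membership in it
theorem foldl_replace_eq_filter (rcs l : List Char) :
    rcs.foldl (fun r c => PySem.Chars.replace r [c] []) l
      = l.filter (fun c => !(rcs.contains c)) := by
  induction rcs generalizing l with
  | nil => simp
  | cons rc rcs ih =>
    rw [List.foldl_cons, replace_single_empty, ih, List.filter_filter]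
    apply List.filter_congr
    intro c _
    by_cases hc : c = rc <;> simp [hc]

-- the String-level foldl of A computes the Chars-level foldl
theorem foldl_str_replace (cs : List Char) (s : String) :
    (cs.foldl (fun r c => PySem.Str.replace r (String.ofList [c]) "") s).toList
      = cs.foldl (fun r c => PySem.Chars.replace r [c] []) s.toList := by
  induction cs generalizing s with
  | nil => rfl
  | cons c cs ih => simp [ih, PySem.Str.toList_replace]

theorem set_contains_ofList (xs : List Char) (c : Char) :
    (PySem.Set.ofList xs).contains c = xs.contains c := by
  by_cases h : c ∈ xs
  · rw [(PySem.Set.contains_iff _ _).mpr ((PySem.Set.mem_ofList xs c).mpr h)]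
    simp [h]
  · have h2 : (PySem.Set.ofList xs).contains c = false := by
      rw [Bool.eq_false_iff]
      intro hb
      exact h ((PySem.Set.mem_ofList xs c).mp ((PySem.Set.contains_iff _ _).mp hb))
    rw [h2]
    simp [h]

theorem filter_not_contains_ofList (xs l : List Char) :
    l.filter (fun c => !((PySem.Set.ofList xs).contains c))
      = l.filter (fun c => !(xs.contains c)) :=
  List.filter_congr (fun c _ => by rw [set_contains_ofList])

-- ===== VERDICT (by name: the statement is the Claim_ definition above) =====
theorem sanitise_fn_name_py_spec : Claim_equal_sanitise_fn_name_py := by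
  intro fn_name _
  unfold Spec_sanitise_fn_name_py sanitise_fn_name_py sanitise_fn_name_py_alt pyDropSet
  rw [← String.toList_inj, String.toList_append, String.toList_append, String.toList_ofList,
    foldl_str_replace, foldl_replace_eq_filter, filter_not_contains_ofList,
    String.toList_append, String.toList_ofList]
  rfl
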